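-- pv_equiv track=rewrite | github.com/CAiM-lab/MiNTiF | MiNTiF_Utils/utils/common_utils.py | sort_markers
-- ===== SOURCE A (Python) =====
-- def sort_markers(lmarkers='12345', length_first=True):
--     if length_first:
--         l = []
--         nt = len(lmarkers)
--         for n1 in range(nt):
--             l += [lmarkers[n1]]
--
--         for n1 in range(nt):
--             for n2 in range(n1 + 1, nt):
--                 l += ["".join([lmarkers[x] for x in (n1, n2)])]
--
--         for n1 in range(nt):
--             for n2 in range(n1 + 1, nt):
--                 for n3 in range(n2 + 1, nt):
--                     l += ["".join([lmarkers[x] for x in (n1, n2, n3)])]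
--
--         for n1 in range(nt):
--             for n2 in range(n1 + 1, nt):
--                 for n3 in range(n2 + 1, nt):
--                     for n4 in range(n3 + 1, nt):
--                         l += ["".join([lmarkers[x] for x in (n1, n2, n3, n4)])]
--
--         for n1 in range(nt):
--             for n2 in range(n1 + 1, nt):
--                 for n3 in range(n2 + 1, nt):
--                     for n4 in range(n3 + 1, nt):
--                         for n5 in range(n4 + 1, nt):
--                             l += ["".join([lmarkers[x] for x in (n1, n2, n3, n4, n5)])]
--         l = ["".join(sorted([y for y in x])) for x in l]
--     else:
--         if length_first:
--             l = []
--             nt = len(lmarkers)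
--
--             for n1 in range(nt):
--                 for n2 in range(n1 + 1, nt):
--                     for n3 in range(n2 + 1, nt):
--                         for n4 in range(n3 + 1, nt):
--                             for n5 in range(n4 + 1, nt):
--                                 l += ["".join([lmarkers[x] for x in (n1, n2, n3, n4, n5)])]
--                             l += ["".join([lmarkers[x] for x in (n1, n2, n3, n4)])]
--                         l += ["".join([lmarkers[x] for x in (n1, n2, n3, n4)])]
--                     for n4 in range(n3 + 1, nt):
--                         l += ["".join([lmarkers[x] for x in (n1, n2, n4)])]
--                 for n3 in range(n2 + 1, nt):
--                     l += ["".join([lmarkers[x] for x in (n1, n3, n4)])]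
--
--             for n1 in range(nt):
--                 for n2 in range(n1 + 1, nt):
--                     for n3 in range(n2 + 1, nt):
--                         for n4 in range(n3 + 1, nt):
--                             l += ["".join([lmarkers[x] for x in (n1, n2, n3, n4, n5)])]
--
--             for n1 in range(nt):
--                 for n2 in range(n1 + 1, nt):
--                     for n3 in range(n2 + 1, nt):
--                         l += ["".join([lmarkers[x] for x in (n1, n2, n3, n4, n5)])]
--
--             for n1 in range(nt):
--                 for n2 in range(n1 + 1, nt):
--                     l += ["".join([lmarkers[x] for x in (n1, n2, n3, n4, n5)])]
--
--             for n1 in range(nt):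
--                 l += ["".join([lmarkers[x] for x in (n1, n2, n3, n4, n5)])]
--             l = ["".join(sorted([y for y in x])) for x in l]
--     return l
-- ===== SOURCE B (Python) =====
-- def sort_markers(lmarkers='12345', length_first=True):
--     # one parametrized pass with a recursive combination generator instead of
--     # five hand-unrolled nested index-loop nests; like A, the else case never
--     # assigns l, so length_first=False raises UnboundLocalError at return.
--     def combos(chars, k):
--         if k == 0:
--             return [[]]
--         if not chars:
--             return []
--         head, rest = chars[0], chars[1:]
--         return [[head] + c for c in combos(rest, k - 1)] + combos(rest, k)
--
--     if length_first:
--         l = []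
--         for k in range(1, 6):
--             for c in combos(list(lmarkers), k):
--                 l.append(''.join(sorted(c)))
--     return l
-- ===== Notes on version B (the rewrite author's own statement) =====
-- stated objective: simpler
-- what changed: The five hand-unrolled nested index-loop nests (one per combination size) are replaced by a single pass over k in range(1,6) using one recursive combination generator, with the per-string character sort applied as each string is built.
import Mathlib
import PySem

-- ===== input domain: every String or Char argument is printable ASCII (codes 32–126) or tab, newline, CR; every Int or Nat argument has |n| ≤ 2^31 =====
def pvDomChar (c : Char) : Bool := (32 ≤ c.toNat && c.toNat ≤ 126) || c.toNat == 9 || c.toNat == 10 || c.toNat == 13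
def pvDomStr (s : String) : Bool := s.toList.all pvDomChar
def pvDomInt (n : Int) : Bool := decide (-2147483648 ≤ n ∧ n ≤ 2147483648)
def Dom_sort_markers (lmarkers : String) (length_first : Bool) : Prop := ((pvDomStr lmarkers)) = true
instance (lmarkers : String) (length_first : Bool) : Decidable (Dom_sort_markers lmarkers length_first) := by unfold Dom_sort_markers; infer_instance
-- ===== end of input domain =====

-- B replaces A's five hand-unrolled nested index-loop nests by one pass over the sizes 1..5
-- with a recursive combination generator (simpler decomposition; same cost).
-- Both raise UnboundLocalError when length_first=False; Pre_ excludes those inputs.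

-- ===== PORT A =====
-- range(a, b) on Nat arguments (A only ranges over 0 ≤ a ≤ b = len)
def pyRangeN (a b : Nat) : List Nat := List.range' a (b - a)

def sort_markers (lmarkers : String) (length_first : Bool) : List String :=
  if length_first then
    let s := lmarkers.toList
    let nt := s.length
    let g : Nat → Char := fun i => s.getD i ' '   -- lmarkers[i], always in range here
    let l1 := (pyRangeN 0 nt).map (fun n1 => [g n1])
    let l2 := (pyRangeN 0 nt).flatMap (fun n1 =>
                (pyRangeN (n1+1) nt).map (fun n2 => [g n1, g n2]))
    let l3 := (pyRangeN 0 nt).flatMap (fun n1 =>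
                (pyRangeN (n1+1) nt).flatMap (fun n2 =>
                  (pyRangeN (n2+1) nt).map (fun n3 => [g n1, g n2, g n3])))
    let l4 := (pyRangeN 0 nt).flatMap (fun n1 =>
                (pyRangeN (n1+1) nt).flatMap (fun n2 =>
                  (pyRangeN (n2+1) nt).flatMap (fun n3 =>
                    (pyRangeN (n3+1) nt).map (fun n4 => [g n1, g n2, g n3, g n4]))))
    let l5 := (pyRangeN 0 nt).flatMap (fun n1 =>
                (pyRangeN (n1+1) nt).flatMap (fun n2 =>
                  (pyRangeN (n2+1) nt).flatMap (fun n3 =>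
                    (pyRangeN (n3+1) nt).flatMap (fun n4 =>
                      (pyRangeN (n4+1) nt).map (fun n5 => [g n1, g n2, g n3, g n4, g n5])))))
    (l1 ++ l2 ++ l3 ++ l4 ++ l5).map (fun x => String.mk (PySem.List.sorted x (fun y => y) false))
  else
    []   -- unreachable under Pre_: Python raises UnboundLocalError here

-- ===== PORT B =====
-- Source B's combos(chars, k) is exactly itertools.combinations' recursion = PySem.List.combinations
def sort_markers_alt (lmarkers : String) (length_first : Bool) : List String :=
  if length_first then
    (pyRangeN 1 6).flatMap (fun k =>
      (PySem.List.combinations lmarkers.toList k).map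
        (fun c => String.mk (PySem.List.sorted c (fun y => y) false)))
  else
    []   -- unreachable under Pre_: Python raises UnboundLocalError here

-- ===== PRECONDITION & SPEC =====
-- Pre_ excludes length_first=False, where both A and B raise UnboundLocalError (l is never assigned).
def Pre_sort_markers (lmarkers : String) (length_first : Bool) : Prop := length_first = true
instance (lmarkers : String) (length_first : Bool) : Decidable (Pre_sort_markers lmarkers length_first) := by unfold Pre_sort_markers; infer_instance
def pvWitness_sort_markers : String × Bool := ("312", true)

def Spec_sort_markers (lmarkers : String) (length_first : Bool) (out : List String) : Prop := out = sort_markers_alt lmarkers length_first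
instance (lmarkers : String) (length_first : Bool) (out : List String) : Decidable (Spec_sort_markers lmarkers length_first out) := by unfold Spec_sort_markers; infer_instance

-- ===== CLAIM (what is proved, stated in full; the proofs are below) =====
def Claim_equal_sort_markers : Prop := ∀ (lmarkers : String) (length_first : Bool), Dom_sort_markers lmarkers length_first → Pre_sort_markers lmarkers length_first → Spec_sort_markers lmarkers length_first (sort_markers lmarkers length_first)

-- ===== LEMMAS AND PROOFS =====

-- the generic shape of A's k-fold nested index loop: increasing index tuples from [a, n)
def idxC : Nat → Nat → Nat → List (List Nat)
  | 0, _, _ => [[]]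
  | k+1, a, n => (pyRangeN a n).flatMap (fun i => (idxC k (i+1) n).map (i :: ·))

lemma pyRangeN_empty {a b : Nat} (h : b ≤ a) : pyRangeN a b = [] := by
  simp [pyRangeN, Nat.sub_eq_zero_of_le h]

lemma pyRangeN_cons {a b : Nat} (h : a < b) : pyRangeN a b = a :: pyRangeN (a+1) b := by
  unfold pyRangeN
  obtain ⟨d, hd⟩ : ∃ d, b - a = d + 1 := ⟨b - a - 1, by omega⟩
  rw [hd]
  simp [List.range'_succ]
  omega

lemma idxC_eq (s : List Char) (k : Nat) : ∀ a,
    (idxC k a s.length).map (List.map (fun i => s.getD i ' '))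
      = PySem.List.combinations (s.drop a) k := by
  induction k with
  | zero => intro a; simp [idxC, PySem.List.combinations_zero]
  | succ k ih =>
    intro a
    by_cases h : a < s.length
    · -- induction on the remaining range length
      have : ∀ d a, s.length - a ≤ d →
          (idxC (k+1) a s.length).map (List.map (fun i => s.getD i ' '))
            = PySem.List.combinations (s.drop a) (k+1) := by
        intro d
        induction d with
        | zero =>
          intro a ha
          have hge : s.length ≤ a := by omega
          simp [idxC, pyRangeN_empty hge, List.drop_eq_nil_of_le hge,
            PySem.List.combinations_nil_succ]
        | succ d ihd =>
          intro a ha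
          by_cases h' : a < s.length
          · have hdrop : s.drop a = s[a] :: s.drop (a+1) := List.drop_eq_getElem_cons h'
            rw [idxC, pyRangeN_cons h', List.flatMap_cons, List.map_append,
              hdrop, PySem.List.combinations_cons_succ]
            congr 1
            · rw [← ih (a+1), List.map_map, List.map_map]
              refine List.map_congr_left ?_
              intro c _
              simp [Function.comp, List.getElem?_eq_getElem h']
            · rw [← ihd (a+1) (by omega), idxC]
          · have hge : s.length ≤ a := by omega
            simp [idxC, pyRangeN_empty hge, List.drop_eq_nil_of_le hge,
              PySem.List.combinations_nil_succ]
      exact this (s.length - a) a le_rfl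
    · have hge : s.length ≤ a := by omega
      simp [idxC, pyRangeN_empty hge, List.drop_eq_nil_of_le hge,
        PySem.List.combinations_nil_succ]

-- A's five loop nests are idxC 1..5 at a = 0
lemma nest_eq (s : List Char) (k : Nat) :
    (idxC k 0 s.length).map (List.map (fun i => s.getD i ' '))
      = PySem.List.combinations s k := by
  simpa using idxC_eq s k 0

-- ===== VERDICT (by name: the statement is the Claim_ definition above) =====
theorem sort_markers_spec : Claim_equal_sort_markers := by
  unfold Claim_equal_sort_markers
  intro lmarkers length_first _ hpre
  unfold Pre_sort_markers at hpre
  subst hpre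
  unfold Spec_sort_markers sort_markers sort_markers_alt
  simp only [if_pos rfl]
  set s := lmarkers.toList with hs
  set g : Nat → Char := fun i => s.getD i ' ' with hg
  have h1 : (pyRangeN 0 s.length).map (fun n1 => [g n1])
      = PySem.List.combinations s 1 := by
    rw [← nest_eq s 1]
    simp [idxC, hg, List.getD_eq_getElem?_getD, ← List.map_eq_flatMap]
  have h2 : (pyRangeN 0 s.length).flatMap (fun n1 =>
        (pyRangeN (n1+1) s.length).map (fun n2 => [g n1, g n2]))
      = PySem.List.combinations s 2 := by
    rw [← nest_eq s 2]
    simp [idxC, hg, List.getD_eq_getElem?_getD, List.map_flatMap, List.map_map, Function.comp_def, ← List.map_eq_flatMap]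
  have h3 : (pyRangeN 0 s.length).flatMap (fun n1 =>
        (pyRangeN (n1+1) s.length).flatMap (fun n2 =>
          (pyRangeN (n2+1) s.length).map (fun n3 => [g n1, g n2, g n3])))
      = PySem.List.combinations s 3 := by
    rw [← nest_eq s 3]
    simp [idxC, hg, List.getD_eq_getElem?_getD, List.map_flatMap, List.map_map, Function.comp_def, ← List.map_eq_flatMap]
  have h4 : (pyRangeN 0 s.length).flatMap (fun n1 =>
        (pyRangeN (n1+1) s.length).flatMap (fun n2 =>
          (pyRangeN (n2+1) s.length).flatMap (fun n3 =>
            (pyRangeN (n3+1) s.length).map (fun n4 => [g n1, g n2, g n3, g n4]))))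
      = PySem.List.combinations s 4 := by
    rw [← nest_eq s 4]
    simp [idxC, hg, List.getD_eq_getElem?_getD, List.map_flatMap, List.map_map, Function.comp_def, ← List.map_eq_flatMap]
  have h5 : (pyRangeN 0 s.length).flatMap (fun n1 =>
        (pyRangeN (n1+1) s.length).flatMap (fun n2 =>
          (pyRangeN (n2+1) s.length).flatMap (fun n3 =>
            (pyRangeN (n3+1) s.length).flatMap (fun n4 =>
              (pyRangeN (n4+1) s.length).map (fun n5 => [g n1, g n2, g n3, g n4, g n5])))))
      = PySem.List.combinations s 5 := by
    rw [← nest_eq s 5]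
    simp [idxC, hg, List.getD_eq_getElem?_getD, List.map_flatMap, List.map_map, Function.comp_def, ← List.map_eq_flatMap]
  have hrange : pyRangeN 1 6 = [1, 2, 3, 4, 5] := by decide
  rw [h1, h2, h3, h4, h5, hrange]
  simp [List.map_append]
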